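-- pv_equiv track=rewrite | github.com/WiFiMon-GEANT/wifimon | twping_parser.py | locate_twping_data
-- ===== SOURCE A (Python) =====
-- def locate_twping_data(twping_output):
--     '''
--         Find the line at which the important part of the twping output starts
--     '''
--     twping_output_parts = twping_output.split('\n')
--     line_to_start = 0
--     for line in twping_output_parts:
--         initial_three_chars = line[0:3]
--         if initial_three_chars == "---":
--             break
--         line_to_start += 1
--     return line_to_start
-- ===== SOURCE B (Python) =====
-- def locate_twping_data(twping_output):
--     '''
--         Find the line at which the important part of the twping output starts
--     '''
--     nl = 0
--     at_start = True
--     for i, c in enumerate(twping_output):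
--         if at_start and twping_output.startswith("---", i):
--             return nl
--         if c == '\n':
--             nl += 1
--             at_start = True
--         else:
--             at_start = False
--     return nl + 1
-- ===== Notes on version B (the rewrite author's own statement) =====
-- stated objective: alternative
-- what changed: B is a single character-level scan of the raw string tracking a newline count and a line-start flag, instead of splitting into a list of lines and walking it with an index counter.
import Mathlib
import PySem

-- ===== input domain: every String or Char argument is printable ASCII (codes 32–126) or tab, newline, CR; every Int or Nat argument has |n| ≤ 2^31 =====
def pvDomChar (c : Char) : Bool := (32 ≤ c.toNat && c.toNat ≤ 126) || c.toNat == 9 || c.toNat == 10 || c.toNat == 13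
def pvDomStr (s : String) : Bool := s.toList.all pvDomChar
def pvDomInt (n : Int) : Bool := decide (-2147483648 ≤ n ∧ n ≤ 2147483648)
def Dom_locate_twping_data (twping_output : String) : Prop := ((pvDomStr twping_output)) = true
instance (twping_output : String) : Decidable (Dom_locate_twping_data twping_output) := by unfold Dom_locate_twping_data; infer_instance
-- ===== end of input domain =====

-- B replaces A's split-into-lines loop by a single character-level scan of the raw
-- string that tracks a newline count and a line-start flag (objective: alternative).

-- ===== PORT A =====
-- for line in twping_output_parts: if line[0:3] == "---": break; line_to_start += 1
def pvGoA : List String → Int → Int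
  | [], line_to_start => line_to_start
  | line :: rest, line_to_start =>
    if PySem.Str.slice line (some 0) (some 3) = "---" then line_to_start
    else pvGoA rest (line_to_start + 1)

def locate_twping_data (twping_output : String) : Int :=
  pvGoA ((PySem.Str.split? twping_output "\n").getD []) 0

-- ===== PORT B =====
-- for i, c in enumerate(twping_output): if at_start and startswith("---", i): return nl; update nl/at_start
def pvGoB : List Char → Bool → Int → Int
  | [], _, nl => nl + 1
  | c :: rest, atStart, nl =>
    if atStart && PySem.Chars.startswith (c :: rest) ['-', '-', '-'] then nl
    else pvGoB rest (decide (c = '\n')) (nl + if c = '\n' then 1 else 0)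

def locate_twping_data_alt (twping_output : String) : Int :=
  pvGoB twping_output.toList true 0

-- ===== PRECONDITION & SPEC =====
def Spec_locate_twping_data (twping_output : String) (out : Int) : Prop := out = locate_twping_data_alt twping_output
instance (twping_output : String) (out : Int) : Decidable (Spec_locate_twping_data twping_output out) := by unfold Spec_locate_twping_data; infer_instance

-- ===== CLAIM (what is proved, stated in full; the proofs are below) =====
def Claim_equal_locate_twping_data : Prop := ∀ (twping_output : String), Dom_locate_twping_data twping_output → Spec_locate_twping_data twping_output (locate_twping_data twping_output)

-- ===== LEMMAS AND PROOFS =====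

-- reference split of a char list at '\n' (proof-side only)
def pvSplit : List Char → List (List Char)
  | [] => [[]]
  | c :: r =>
    if c = '\n' then [] :: pvSplit r
    else
      match pvSplit r with
      | [] => [[c]]
      | p :: ps => (c :: p) :: ps

-- list-level version of A's loop (proof-side only)
def pvGoAL : List (List Char) → Int → Int
  | [], n => n
  | l :: rest, n => if l.take 3 = ['-', '-', '-'] then n else pvGoAL rest (n + 1)

def pvJoin : List (List Char) → List Char
  | [] => []
  | [l] => l
  | l :: l2 :: rest => l ++ '\n' :: pvJoin (l2 :: rest)

theorem pvSplit_ne_nil (s : List Char) : pvSplit s ≠ [] := by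
  cases s with
  | nil => simp [pvSplit]
  | cons c r =>
    simp only [pvSplit]
    split
    · simp
    · split <;> simp

theorem pvSplit_no_nl (s : List Char) : ∀ l ∈ pvSplit s, '\n' ∉ l := by
  induction s with
  | nil => simp [pvSplit]
  | cons c r ih =>
    simp only [pvSplit]
    split
    · intro l hl
      rcases List.mem_cons.mp hl with h | h
      · subst h; simp
      · exact ih l h
    · rename_i hc
      cases hps : pvSplit r with
      | nil => exact absurd hps (pvSplit_ne_nil r)
      | cons p ps =>
        intro l hl
        rcases List.mem_cons.mp hl with h | h
        · subst h
          intro hmem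
          rcases List.mem_cons.mp hmem with h' | h'
          · exact hc h'.symm
          · exact ih p (by rw [hps]; exact List.mem_cons_self) h'
        · exact ih l (by rw [hps]; exact List.mem_cons_of_mem _ h)

theorem pvJoin_pvSplit (s : List Char) : pvJoin (pvSplit s) = s := by
  induction s with
  | nil => simp [pvSplit, pvJoin]
  | cons c r ih =>
    simp only [pvSplit]
    split
    · rename_i hc
      cases hps : pvSplit r with
      | nil => exact absurd hps (pvSplit_ne_nil r)
      | cons p ps =>
        rw [hps] at ih
        simp [pvJoin, ih, hc]
    · cases hps : pvSplit r with
      | nil => exact absurd hps (pvSplit_ne_nil r)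
      | cons p ps =>
        rw [hps] at ih
        cases ps with
        | nil =>
          simp only [pvJoin] at ih ⊢
          rw [ih]
        | cons q qs =>
          simp only [pvJoin] at ih ⊢
          rw [List.cons_append, ih]

theorem pvSplit_of_no_nl (m : List Char) (h : '\n' ∉ m) : pvSplit m = [m] := by
  induction m with
  | nil => simp [pvSplit]
  | cons c r ih =>
    have hc : ¬ (c = '\n') := fun hh => h (by simp [hh])
    rw [pvSplit, if_neg hc, ih (fun hm => h (by simp [hm]))]

theorem pvSplit_append_nl (m : List Char) (h : '\n' ∉ m) (r : List Char) :
    pvSplit (m ++ '\n' :: r) = m :: pvSplit r := by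
  induction m with
  | nil => simp [pvSplit]
  | cons c t ih =>
    have hc : ¬ (c = '\n') := fun hh => h (by simp [hh])
    rw [List.cons_append, pvSplit, if_neg hc, ih (fun hm => h (by simp [hm]))]

theorem pvGo_spec : ∀ (fuel : Nat) (l cur : List Char) (acc : List (List Char)),
    l.length < fuel → '\n' ∉ cur →
    PySem.Chars.splitOn.go ['\n'] fuel l cur acc = acc.reverse ++ pvSplit (cur.reverse ++ l) := by
  intro fuel
  induction fuel with
  | zero => intro l cur acc h _; exact absurd h (Nat.not_lt_zero _)
  | succ n ih =>
    intro l cur acc h hcur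
    have hcurrev : '\n' ∉ cur.reverse := by simpa using hcur
    cases l with
    | nil =>
      simp [PySem.Chars.splitOn.go, pvSplit_of_no_nl cur.reverse hcurrev]
    | cons c rest =>
      by_cases hc : c = '\n'
      · subst hc
        have hstep : PySem.Chars.splitOn.go ['\n'] (n+1) ('\n' :: rest) cur acc =
            PySem.Chars.splitOn.go ['\n'] n rest [] (cur.reverse :: acc) := by
          simp [PySem.Chars.splitOn.go, List.isPrefixOf]
        rw [hstep, ih rest [] (cur.reverse :: acc) (by simpa using h) (by simp),
          pvSplit_append_nl cur.reverse hcurrev rest]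
        simp
      · have hstep : PySem.Chars.splitOn.go ['\n'] (n+1) (c :: rest) cur acc =
            PySem.Chars.splitOn.go ['\n'] n rest (c :: cur) acc := by
          simp [PySem.Chars.splitOn.go, List.isPrefixOf, Ne.symm hc]
        rw [hstep, ih rest (c :: cur) acc (by simpa using h)
          (fun hm => by rcases List.mem_cons.mp hm with h' | h' <;> [exact hc h'.symm; exact hcur h'])]
        simp

theorem pvSplitOn_eq (s : List Char) : PySem.Chars.splitOn s ['\n'] = pvSplit s := by
  unfold PySem.Chars.splitOn
  simpa using pvGo_spec (s.length + 1) s [] [] (by omega) (by simp)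

theorem pvL2 : ∀ (l : List Char), '\n' ∉ l → ∀ acc, pvGoB l false acc = acc + 1 := by
  intro l
  induction l with
  | nil => intro _ acc; simp [pvGoB]
  | cons c r ih =>
    intro h acc
    have hc : ¬ (c = '\n') := fun hh => h (by simp [hh])
    simp [pvGoB, hc, ih (fun hm => h (by simp [hm]))]

theorem pvL1 : ∀ (l : List Char), '\n' ∉ l → ∀ (tail : List Char) (acc : Int),
    pvGoB (l ++ '\n' :: tail) false acc = pvGoB tail true (acc + 1) := by
  intro l
  induction l with
  | nil => intro _ tail acc; simp [pvGoB]
  | cons c r ih =>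
    intro h tail acc
    have hc : ¬ (c = '\n') := fun hh => h (by simp [hh])
    simp [pvGoB, hc, ih (fun hm => h (by simp [hm]))]

theorem pvDashPrefixAppend (l J : List Char) :
    (['-', '-', '-'] <+: (l ++ '\n' :: J)) ↔ (['-', '-', '-'] <+: l) := by
  rcases l with _ | ⟨a, _ | ⟨b, _ | ⟨c, t⟩⟩⟩ <;>
    simp [List.prefix_iff_eq_take, List.take]

theorem pvM : ∀ (lines : List (List Char)), (∀ l ∈ lines, '\n' ∉ l) → lines ≠ [] →
    ∀ acc, pvGoB (pvJoin lines) true acc = pvGoAL lines acc := by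
  intro lines
  induction lines with
  | nil => intro _ h; exact absurd rfl h
  | cons l ls ih =>
    intro hno _ acc
    have hl : '\n' ∉ l := hno l List.mem_cons_self
    by_cases hp : ['-', '-', '-'] <+: l
    · have htake : l.take 3 = ['-', '-', '-'] := by
        have := List.prefix_iff_eq_take.mp hp
        simpa using this.symm
      have hA : pvGoAL (l :: ls) acc = acc := by
        simp only [pvGoAL]; rw [if_pos htake]
      obtain ⟨t, rfl⟩ := hp
      cases ls with
      | nil =>
        have hs : PySem.Chars.startswith ('-' :: '-' :: '-' :: t) ['-', '-', '-'] = true :=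
          (PySem.Chars.startswith_iff _ _).mpr ⟨t, rfl⟩
        rw [hA]
        simp [pvJoin, pvGoB, hs]
      | cons l2 rest =>
        have hs : PySem.Chars.startswith ('-' :: '-' :: '-' :: (t ++ '\n' :: pvJoin (l2 :: rest))) ['-', '-', '-'] = true :=
          (PySem.Chars.startswith_iff _ _).mpr ⟨t ++ '\n' :: pvJoin (l2 :: rest), rfl⟩
        rw [hA]
        simp only [pvJoin, List.cons_append]
        simp [pvGoB, hs]
    · have htake : ¬ l.take 3 = ['-', '-', '-'] := by
        intro h
        exact hp (List.prefix_iff_eq_take.mpr (by simpa using h.symm))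
      have hA : pvGoAL (l :: ls) acc = pvGoAL ls (acc + 1) := by
        simp only [pvGoAL]; rw [if_neg htake]
      cases ls with
      | nil =>
        rw [hA]
        cases l with
        | nil => simp [pvJoin, pvGoB, pvGoAL]
        | cons c r =>
          have hs : PySem.Chars.startswith (c :: r) ['-', '-', '-'] = false := by
            rw [Bool.eq_false_iff]
            intro h
            exact hp ((PySem.Chars.startswith_iff _ _).mp h)
          have hc : ¬ (c = '\n') := fun hh => hl (by simp [hh])
          simp [pvJoin, pvGoB, hs, hc, pvGoAL,
            pvL2 r (fun hm => hl (by simp [hm]))]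
      | cons l2 rest =>
        have hrec := ih (fun x hx => hno x (List.mem_cons_of_mem _ hx)) (by simp) (acc + 1)
        rw [hA, ← hrec]
        cases l with
        | nil =>
          have hs : PySem.Chars.startswith ('\n' :: pvJoin (l2 :: rest)) ['-', '-', '-'] = false := by
            rw [Bool.eq_false_iff]
            intro h
            obtain ⟨u, hu⟩ := (PySem.Chars.startswith_iff _ _).mp h
            simp at hu
          simp [pvJoin, pvGoB, hs]
        | cons c r =>
          have hs : PySem.Chars.startswith (c :: (r ++ '\n' :: pvJoin (l2 :: rest))) ['-', '-', '-'] = false := by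
            rw [Bool.eq_false_iff]
            intro h
            exact hp ((pvDashPrefixAppend (c :: r) _).mp (by
              simpa [List.cons_append] using (PySem.Chars.startswith_iff _ _).mp h))
          have hc : ¬ (c = '\n') := fun hh => hl (by simp [hh])
          have hstep := pvL1 r (fun hm => hl (by simp [hm])) (pvJoin (l2 :: rest)) acc
          calc pvGoB (pvJoin ((c :: r) :: l2 :: rest)) true acc
              = pvGoB (r ++ '\n' :: pvJoin (l2 :: rest)) false acc := by
                simp only [pvJoin, List.cons_append]
                simp [pvGoB, hs, hc]
            _ = pvGoB (pvJoin (l2 :: rest)) true (acc + 1) := hstep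

theorem pvGoA_eq_goAL : ∀ (ls : List String) (n : Int),
    pvGoA ls n = pvGoAL (ls.map String.toList) n := by
  intro ls
  induction ls with
  | nil => intro n; simp [pvGoA, pvGoAL]
  | cons line rest ih =>
    intro n
    have hsl : PySem.List.slice line.toList none (some 3) = line.toList.take 3 := by
      simp [pysem]
    have hcond : (PySem.Str.slice line (some 0) (some 3) = "---") ↔
        (line.toList.take 3 = ['-', '-', '-']) := by
      rw [← String.toList_inj]
      simp [PySem.Str.toList_slice, PySem.Chars.slice_eq_listSlice, hsl]
    by_cases h : PySem.Str.slice line (some 0) (some 3) = "---"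
    · simp only [pvGoA, pvGoAL, List.map_cons]
      rw [if_pos h, if_pos (hcond.mp h)]
    · simp only [pvGoA, pvGoAL, List.map_cons]
      rw [if_neg h, if_neg (fun hh => h (hcond.mpr hh)), ih]

-- ===== VERDICT (by name: the statement is the Claim_ definition above) =====
theorem locate_twping_data_spec : Claim_equal_locate_twping_data := by
  intro s _
  unfold Spec_locate_twping_data locate_twping_data locate_twping_data_alt
  have hsplit : List.map String.toList ((PySem.Str.split? s "\n").getD []) = pvSplit s.toList := by
    have h := PySem.Str.split?_map s "\n"
    rw [show ("\n" : String).toList = ['\n'] from rfl] at h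
    have h2 : PySem.Chars.split? s.toList ['\n'] = some (pvSplit s.toList) := by
      rw [PySem.Chars.split?]
      simp [pvSplitOn_eq]
    rw [h2] at h
    cases hs : PySem.Str.split? s "\n" with
    | none => rw [hs] at h; simp at h
    | some parts =>
      rw [hs] at h
      simp only [Option.map_some, Option.some.injEq] at h
      simpa using h
  rw [pvGoA_eq_goAL, hsplit]
  rw [← pvM (pvSplit s.toList) (pvSplit_no_nl s.toList) (pvSplit_ne_nil s.toList) 0,
    pvJoin_pvSplit]
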